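-- pv_equiv track=rewrite | github.com/FuckerLinda/pacrep | data/benchmark/vpn-flow-two_class-3-23-2-fast.py | split_counts_for_one_app
-- ===== SOURCE A (Python) =====
-- VALID_RATIO = 0.1
--
-- TEST_RATIO = 0.1
--
-- MIN_TRAIN_PER_APP = 1
--
-- MIN_VALID_PER_APP = 1
--
-- MIN_TEST_PER_APP = 1
--
-- MIN_TOTAL_PER_APP = MIN_TRAIN_PER_APP + MIN_VALID_PER_APP + MIN_TEST_PER_APP
--
-- def split_counts_for_one_app(n):
--     if n < MIN_TOTAL_PER_APP:
--         raise RuntimeError(f"n={n} 太小，无法切分")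
--
--     n_valid = max(MIN_VALID_PER_APP, int(round(n * VALID_RATIO)))
--     n_test = max(MIN_TEST_PER_APP, int(round(n * TEST_RATIO)))
--     n_train = n - n_valid - n_test
--
--     if n_train < MIN_TRAIN_PER_APP:
--         while n_train < MIN_TRAIN_PER_APP:
--             if n_valid > MIN_VALID_PER_APP:
--                 n_valid -= 1
--                 n_train += 1
--             elif n_test > MIN_TEST_PER_APP:
--                 n_test -= 1
--                 n_train += 1
--             else:
--                 raise RuntimeError(f"n={n} 无法满足 train/valid/test 最低要求")
--
--     return n_train, n_valid, n_test
-- ===== SOURCE B (Python) =====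
-- VALID_RATIO = 0.1
-- TEST_RATIO = 0.1
-- MIN_TRAIN_PER_APP = 1
-- MIN_VALID_PER_APP = 1
-- MIN_TEST_PER_APP = 1
-- MIN_TOTAL_PER_APP = MIN_TRAIN_PER_APP + MIN_VALID_PER_APP + MIN_TEST_PER_APP
--
-- def split_counts_for_one_app(n):
--     if n < MIN_TOTAL_PER_APP:
--         raise RuntimeError(f"n={n} 太小，无法切分")
--
--     n_valid = max(MIN_VALID_PER_APP, int(round(n * VALID_RATIO)))
--     n_test = max(MIN_TEST_PER_APP, int(round(n * TEST_RATIO)))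
--     n_train = n - n_valid - n_test
--
--     if n_train < MIN_TRAIN_PER_APP:
--         deficit = MIN_TRAIN_PER_APP - n_train
--         borrow_v = min(deficit, n_valid - MIN_VALID_PER_APP)
--         borrow_t = min(deficit - borrow_v, n_test - MIN_TEST_PER_APP)
--         if borrow_v + borrow_t < deficit:
--             raise RuntimeError(f"n={n} 无法满足 train/valid/test 最低要求")
--         n_valid -= borrow_v
--         n_test -= borrow_t
--         n_train += borrow_v + borrow_t
--
--     return n_train, n_valid, n_test
-- ===== Notes on version B (the rewrite author's own statement) =====
-- stated objective: simpler
-- what changed: The one-at-a-time borrowing while loop is replaced by direct closed-form arithmetic: compute the deficit and borrow min-capped amounts from valid then test in one step.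
import Mathlib
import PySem

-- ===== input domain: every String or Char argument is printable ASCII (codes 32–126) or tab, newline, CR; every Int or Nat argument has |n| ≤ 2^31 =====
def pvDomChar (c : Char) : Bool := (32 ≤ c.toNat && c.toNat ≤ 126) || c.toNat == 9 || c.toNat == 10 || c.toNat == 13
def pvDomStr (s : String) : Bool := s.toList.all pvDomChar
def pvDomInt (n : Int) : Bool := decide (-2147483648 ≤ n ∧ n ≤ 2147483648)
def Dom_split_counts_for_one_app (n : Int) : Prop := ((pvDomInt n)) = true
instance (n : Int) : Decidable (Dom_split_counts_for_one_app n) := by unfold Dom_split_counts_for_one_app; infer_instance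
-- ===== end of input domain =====

-- B replaces A's one-at-a-time borrowing while loop by direct closed-form deficit arithmetic (simpler).


-- Hand port of Python's `int(round(n * 0.1))`: round-half-to-even of n/10.
-- Exact on the stated domain |n| ≤ 2^31 (there `n * 0.1` as a double rounds to the
-- same integer as exact n/10 with banker's rounding; checked exhaustively/near ties).
def pyRound10 (n : Int) : Int :=
  let q := PySem.Int.floordiv n 10
  let r := PySem.Int.mod n 10
  if r > 5 ∨ (r = 5 ∧ PySem.Int.mod q 2 = 1) then q + 1 else q

-- ===== PORT A =====
-- A's while loop: borrow 1 from valid (while above its min), else from test, until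
-- n_train ≥ 1; the `else` raise branch returns (0, 0, 0), which Pre_ excludes.
def borrowLoopA (n_train n_valid n_test : Int) : Int × Int × Int :=
  if n_train < 1 then
    if n_valid > 1 then borrowLoopA (n_train + 1) (n_valid - 1) n_test
    else if n_test > 1 then borrowLoopA (n_train + 1) n_valid (n_test - 1)
    else (0, 0, 0)  -- raise RuntimeError (outside Pre_)
  else (n_train, n_valid, n_test)
termination_by (1 - n_train).toNat
decreasing_by all_goals · simp only [Int.lt_iff_add_one_le] at *; omega

def split_counts_for_one_app (n : Int) : Int × Int × Int :=
  if n < 3 then (0, 0, 0)  -- raise RuntimeError (outside Pre_)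
  else
    let n_valid := max 1 (pyRound10 n)
    let n_test := max 1 (pyRound10 n)
    let n_train := n - n_valid - n_test
    if n_train < 1 then borrowLoopA n_train n_valid n_test
    else (n_train, n_valid, n_test)

-- ===== PORT B =====
def split_counts_for_one_app_alt (n : Int) : Int × Int × Int :=
  if n < 3 then (0, 0, 0)  -- raise RuntimeError (outside Pre_)
  else
    let n_valid := max 1 (pyRound10 n)
    let n_test := max 1 (pyRound10 n)
    let n_train := n - n_valid - n_test
    if n_train < 1 then
      let deficit := 1 - n_train
      let borrow_v := min deficit (n_valid - 1)
      let borrow_t := min (deficit - borrow_v) (n_test - 1)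
      if borrow_v + borrow_t < deficit then (0, 0, 0)  -- raise RuntimeError (outside Pre_)
      else (n_train + borrow_v + borrow_t, n_valid - borrow_v, n_test - borrow_t)
    else (n_train, n_valid, n_test)

-- ===== PRECONDITION & SPEC =====
-- Pre_ excludes exactly n < 3, where Python A raises RuntimeError ("n 太小").
def Pre_split_counts_for_one_app (n : Int) : Prop := 3 ≤ n
instance (n : Int) : Decidable (Pre_split_counts_for_one_app n) := by unfold Pre_split_counts_for_one_app; infer_instance
def pvWitness_split_counts_for_one_app : Int := 10

def Spec_split_counts_for_one_app (n : Int) (out : Int × Int × Int) : Prop := out = split_counts_for_one_app_alt n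
instance (n : Int) (out : Int × Int × Int) : Decidable (Spec_split_counts_for_one_app n out) := by unfold Spec_split_counts_for_one_app; infer_instance

-- ===== CLAIM (what is proved, stated in full; the proofs are below) =====
def Claim_equal_split_counts_for_one_app : Prop := ∀ (n : Int), Dom_split_counts_for_one_app n → Pre_split_counts_for_one_app n → Spec_split_counts_for_one_app n (split_counts_for_one_app n)

-- ===== LEMMAS AND PROOFS =====

-- A's borrowing loop computes B's closed-form borrow amounts, provided both pools
-- are at least at their minimum 1 and the total borrowable capacity covers the deficit.
theorem borrowLoopA_eq (n_train n_valid n_test : Int)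
    (hv : 1 ≤ n_valid) (ht : 1 ≤ n_test)
    (hcap : 1 ≤ n_train + (n_valid - 1) + (n_test - 1)) :
    borrowLoopA n_train n_valid n_test =
      (n_train + min (max 0 (1 - n_train)) (n_valid - 1)
               + min (max 0 (1 - n_train) - min (max 0 (1 - n_train)) (n_valid - 1)) (n_test - 1),
       n_valid - min (max 0 (1 - n_train)) (n_valid - 1),
       n_test - min (max 0 (1 - n_train) - min (max 0 (1 - n_train)) (n_valid - 1)) (n_test - 1)) := by
  fun_induction borrowLoopA n_train n_valid n_test with
  | case1 a v t h1 h2 ih =>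
    rw [ih (by omega) ht (by omega)]
    refine Prod.ext ?_ (Prod.ext ?_ ?_) <;> simp <;> omega
  | case2 a v t h1 h2 h3 ih =>
    rw [ih hv (by omega) (by omega)]
    refine Prod.ext ?_ (Prod.ext ?_ ?_) <;> simp <;> omega
  | case3 a v t h1 h2 h3 =>
    exfalso; omega
  | case4 a v t h1 =>
    refine Prod.ext ?_ (Prod.ext ?_ ?_) <;> simp <;> omega

-- ===== VERDICT (by name: the statement is the Claim_ definition above) =====
theorem split_counts_for_one_app_spec : Claim_equal_split_counts_for_one_app := by
  intro n _ hpre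
  unfold Pre_split_counts_for_one_app at hpre
  unfold Spec_split_counts_for_one_app split_counts_for_one_app split_counts_for_one_app_alt
  have h3 : ¬ n < 3 := by omega
  simp only [h3, if_false]
  set v := max 1 (pyRound10 n) with hv
  have hv1 : 1 ≤ v := le_max_left _ _
  by_cases htr : n - v - v < 1
  · rw [if_pos htr, if_pos htr, borrowLoopA_eq _ _ _ hv1 hv1 (by omega)]
    have hmax : max 0 (1 - (n - v - v)) = 1 - (n - v - v) := by omega
    rw [if_neg (by omega)]
    refine Prod.ext ?_ (Prod.ext ?_ ?_) <;> simp [hmax]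
  · rw [if_neg htr, if_neg htr]
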